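-- pv_equiv track=rewrite | github.com/fred0m/Steam_Recommend | Steam_Recommend/Prog_GameRecommend.py | g_datanum
-- ===== SOURCE A (Python) =====
-- def g_datanum(data,node,common,g1,g2,g3,status):           #输入游戏的量
--     nn = []
--     n = 0
--     if status == 1:
--             for iterms in node:
--                 if g1 in data[iterms]:
--                     n += 1
--             nn.append(n)
--             n = 0
--             for iterms in node:
--                 if g2 in data[iterms]:
--                     n += 1
--             nn.append(n)
--             n = 0
--             for iterms in node:
--                 if g3 in data[iterms]:
--                     n += 1
--             nn.append(n)
--     if status == 2:
--             for iterms in node: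
--                 if g1 in data[iterms]:
--                     n += 1
--             nn.append(n)
--             n = 0
--             for iterms in node:
--                 if g2 in data[iterms]:
--                     n += 1
--             nn.append(n)
--     if status == 3:
--             for iterms in node:
--                 if g1 in data[iterms]:
--                     n += 1
--             nn.append(n)
--             n = 0
--             for iterms in node:
--                 if g3 in data[iterms]:
--                     n += 1
--             nn.append(n)
--     if status == 4:
--             for iterms in node:
--                 if g2 in data[iterms]:
--                     n += 1
--             nn.append(n)
--             n = 0
--             for iterms in node:
--                 if g3 in data[iterms]:
--                     n += 1
--             nn.append(n)
--     return nn
-- ===== SOURCE B (Python) =====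
-- def g_datanum(data, node, common, g1, g2, g3, status):
--     targets = {1: [g1, g2, g3], 2: [g1, g2], 3: [g1, g3], 4: [g2, g3]}.get(status, [])
--     if not targets:
--         return []
--     counts = [0] * len(targets)
--     for it in node:
--         d = data[it]
--         for i, g in enumerate(targets):
--             if g in d:
--                 counts[i] += 1
--     return counts
-- ===== Notes on version B (the rewrite author's own statement) =====
-- stated objective: alternative
-- what changed: A scans the node list once per target game in a separate loop per game; B builds the status-determined target list once and makes a single pass over node, doing one dict lookup per node and updating all counters together.
import Mathlib
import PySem

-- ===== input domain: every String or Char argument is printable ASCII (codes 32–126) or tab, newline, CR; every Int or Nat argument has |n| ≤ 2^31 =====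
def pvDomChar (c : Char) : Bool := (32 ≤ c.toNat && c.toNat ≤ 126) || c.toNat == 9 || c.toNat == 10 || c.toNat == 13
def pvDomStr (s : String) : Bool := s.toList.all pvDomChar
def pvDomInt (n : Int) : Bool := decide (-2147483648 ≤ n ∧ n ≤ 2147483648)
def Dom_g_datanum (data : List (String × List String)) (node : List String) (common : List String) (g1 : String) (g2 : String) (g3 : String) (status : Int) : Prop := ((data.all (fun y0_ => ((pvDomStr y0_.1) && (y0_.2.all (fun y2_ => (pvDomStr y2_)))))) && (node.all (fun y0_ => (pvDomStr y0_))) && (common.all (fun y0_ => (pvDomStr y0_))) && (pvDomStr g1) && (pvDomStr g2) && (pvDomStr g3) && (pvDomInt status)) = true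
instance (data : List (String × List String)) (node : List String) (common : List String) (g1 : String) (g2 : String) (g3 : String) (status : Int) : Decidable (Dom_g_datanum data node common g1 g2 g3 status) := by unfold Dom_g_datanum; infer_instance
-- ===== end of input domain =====

-- B replaces A's one-scan-of-node-per-game loops by a single pass over node updating
-- all status-selected counters at once (objective: alternative decomposition, same cost).

-- ===== PORT A =====
-- A's 'g in data[iterms]' with a present key: dict lookup then list membership.
def g_datanum (data : List (String × List String)) (node : List String) (common : List String) (g1 : String) (g2 : String) (g3 : String) (status : Int) : List Int :=
  let d := PySem.Dict.mk data
  let nn : List Int := []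
  let n : Int := 0
  let nn :=
    if status = 1 then
      let n := node.foldl (fun n it => if (d.getD it []).contains g1 then n + 1 else n) n
      let nn := nn ++ [n]
      let n : Int := 0
      let n := node.foldl (fun n it => if (d.getD it []).contains g2 then n + 1 else n) n
      let nn := nn ++ [n]
      let n : Int := 0
      let n := node.foldl (fun n it => if (d.getD it []).contains g3 then n + 1 else n) n
      nn ++ [n]
    else nn
  let nn :=
    if status = 2 then
      let n := node.foldl (fun n it => if (d.getD it []).contains g1 then n + 1 else n) n
      let nn := nn ++ [n]
      let n : Int := 0
      let n := node.foldl (fun n it => if (d.getD it []).contains g2 then n + 1 else n) n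
      nn ++ [n]
    else nn
  let nn :=
    if status = 3 then
      let n := node.foldl (fun n it => if (d.getD it []).contains g1 then n + 1 else n) n
      let nn := nn ++ [n]
      let n : Int := 0
      let n := node.foldl (fun n it => if (d.getD it []).contains g3 then n + 1 else n) n
      nn ++ [n]
    else nn
  let nn :=
    if status = 4 then
      let n := node.foldl (fun n it => if (d.getD it []).contains g2 then n + 1 else n) n
      let nn := nn ++ [n]
      let n : Int := 0
      let n := node.foldl (fun n it => if (d.getD it []).contains g3 then n + 1 else n) n
      nn ++ [n]
    else nn
  nn

-- ===== PORT B =====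
def g_datanum_alt (data : List (String × List String)) (node : List String) (common : List String) (g1 : String) (g2 : String) (g3 : String) (status : Int) : List Int :=
  let targets : List String :=
    if status = 1 then [g1, g2, g3]
    else if status = 2 then [g1, g2]
    else if status = 3 then [g1, g3]
    else if status = 4 then [g2, g3]
    else []
  if targets = [] then []
  else
    node.foldl
      (fun counts it =>
        let dv := (PySem.Dict.mk data).getD it []
        List.zipWith (fun c g => if dv.contains g then c + 1 else c) counts targets)
      (targets.map (fun _ => (0 : Int)))

-- ===== PRECONDITION & SPEC =====
-- A raises KeyError when status is 1–4 and some node is missing from data; exactly those inputs are excluded.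
def Pre_g_datanum (data : List (String × List String)) (node : List String) (common : List String) (g1 : String) (g2 : String) (g3 : String) (status : Int) : Prop :=
  (status = 1 ∨ status = 2 ∨ status = 3 ∨ status = 4) →
    ∀ it ∈ node, (PySem.Dict.mk data).contains it = true
instance (data : List (String × List String)) (node : List String) (common : List String) (g1 : String) (g2 : String) (g3 : String) (status : Int) : Decidable (Pre_g_datanum data node common g1 g2 g3 status) := by unfold Pre_g_datanum; infer_instance
def pvWitness_g_datanum : (List (String × List String)) × List String × List String × String × String × String × Int :=
  ([("u", ["a", "b"]), ("v", ["b"])], ["u", "v", "u"], [], "a", "b", "c", 1)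

def Spec_g_datanum (data : List (String × List String)) (node : List String) (common : List String) (g1 : String) (g2 : String) (g3 : String) (status : Int) (out : List Int) : Prop := out = g_datanum_alt data node common g1 g2 g3 status
instance (data : List (String × List String)) (node : List String) (common : List String) (g1 : String) (g2 : String) (g3 : String) (status : Int) (out : List Int) : Decidable (Spec_g_datanum data node common g1 g2 g3 status out) := by unfold Spec_g_datanum; infer_instance

-- ===== CLAIM (what is proved, stated in full; the proofs are below) =====
def Claim_equal_g_datanum : Prop := ∀ (data : List (String × List String)) (node : List String) (common : List String) (g1 : String) (g2 : String) (g3 : String) (status : Int), Dom_g_datanum data node common g1 g2 g3 status → Pre_g_datanum data node common g1 g2 g3 status → Spec_g_datanum data node common g1 g2 g3 status (g_datanum data node common g1 g2 g3 status)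

-- ===== LEMMAS AND PROOFS =====

-- a counter fold started at a instead of 0
theorem pv_foldl_count_shift (step : String → Prop) [DecidablePred step] (l : List String) (a : Int) :
    l.foldl (fun n it => if step it then n + 1 else n) a
      = a + l.foldl (fun n it => if step it then n + 1 else n) 0 := by
  induction l generalizing a with
  | nil => simp
  | cons x xs ih =>
    simp only [List.foldl_cons]
    rw [ih, ih (if step x then 0 + 1 else 0)]
    split <;> omega

theorem pv_zipWith_congr (f f' : Int → String → Int) (h : ∀ c g, f c g = f' c g)
    (cs : List Int) (ts : List String) :
    List.zipWith f cs ts = List.zipWith f' cs ts := by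
  induction cs generalizing ts with
  | nil => simp
  | cons c cs ih => cases ts with
    | nil => simp
    | cons t ts => simp [h, ih]

theorem pv_zipWith_zipWith (f h : Int → String → Int) (cs : List Int) (ts : List String) :
    List.zipWith f (List.zipWith h cs ts) ts
      = List.zipWith (fun c g => f (h c g) g) cs ts := by
  induction cs generalizing ts with
  | nil => simp
  | cons c cs ih => cases ts with
    | nil => simp
    | cons t ts => simp [ih]

theorem pv_zipWith_self (f : Int → String → Int) (hf : ∀ c g, f c g = c)
    (cs : List Int) (ts : List String) (h : cs.length = ts.length) :
    List.zipWith f cs ts = cs := by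
  induction cs generalizing ts with
  | nil => simp
  | cons c cs ih => cases ts with
    | nil => simp at h
    | cons t ts =>
      simp only [List.zipWith_cons_cons, hf]
      simp only [List.length_cons, Nat.add_right_cancel_iff] at h
      rw [ih ts h]

-- main invariant: the single-pass fold equals per-game counts added pointwise
theorem pv_fold_main (dv : String → List String) (node : List String)
    (ts : List String) (cs : List Int) (h : cs.length = ts.length) :
    node.foldl (fun counts it =>
        List.zipWith (fun c g => if g ∈ dv it then c + 1 else c) counts ts) cs
      = List.zipWith (fun c g =>
          c + node.foldl (fun n it => if g ∈ dv it then n + 1 else n) 0) cs ts := by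
  induction node generalizing cs with
  | nil =>
    simp only [List.foldl_nil]
    exact (pv_zipWith_self _ (fun c g => by simp) cs ts h).symm
  | cons x xs ih =>
    simp only [List.foldl_cons]
    rw [ih _ (by simp [h]), pv_zipWith_zipWith]
    apply pv_zipWith_congr
    intro c g
    rw [pv_foldl_count_shift (fun it => g ∈ dv it) xs (if g ∈ dv x then (0:Int) + 1 else 0)]
    split <;> omega

theorem pv_fold_counts (dv : String → List String) (node : List String) (ts : List String) :
    node.foldl (fun counts it =>
        List.zipWith (fun c g => if g ∈ dv it then c + 1 else c) counts ts)
      (ts.map (fun _ => (0 : Int)))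
      = ts.map (fun g => node.foldl (fun n it => if g ∈ dv it then n + 1 else n) 0) := by
  rw [pv_fold_main dv node ts _ (by simp)]
  induction ts with
  | nil => rfl
  | cons t ts ih => simp only [List.map_cons, List.zipWith_cons_cons, zero_add, ih]

-- ===== VERDICT (by name: the statement is the Claim_ definition above) =====
theorem g_datanum_spec : Claim_equal_g_datanum := by
  intro data node common g1 g2 g3 status _ _
  unfold Spec_g_datanum g_datanum g_datanum_alt
  by_cases h1 : status = 1
  · simp only [h1]
    norm_num
    rw [show ([0,0,0] : List Int) = [g1,g2,g3].map (fun _ => (0:Int)) from rfl,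
        pv_fold_counts (fun it => (PySem.Dict.mk data).getD it [])]
    simp
  · by_cases h2 : status = 2
    · simp only [h1, h2]
      norm_num
      rw [show ([0,0] : List Int) = [g1,g2].map (fun _ => (0:Int)) from rfl,
          pv_fold_counts (fun it => (PySem.Dict.mk data).getD it [])]
      simp
    · by_cases h3 : status = 3
      · simp only [h1, h2, h3]
        norm_num
        rw [show ([0,0] : List Int) = [g1,g3].map (fun _ => (0:Int)) from rfl,
            pv_fold_counts (fun it => (PySem.Dict.mk data).getD it [])]
        simp
      · by_cases h4 : status = 4
        · simp only [h1, h2, h3, h4]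
          norm_num
          rw [show ([0,0] : List Int) = [g2,g3].map (fun _ => (0:Int)) from rfl,
              pv_fold_counts (fun it => (PySem.Dict.mk data).getD it [])]
          simp
        · simp [h1, h2, h3, h4]
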